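-- pv_equiv track=rewrite | github.com/Jonathana1106/PythonITP | Practicas/Practica 4 Intro.py | c_aux
-- ===== SOURCE A (Python) =====
-- def c_aux(lista, i, j, r):
--     if j >= len(lista):
--         return False
--     elif r + lista[i] == lista[j]:
--         return True
--     else:
--         r = r + lista[i]
--         return c_aux(lista, i+1, j+1, r)
-- ===== SOURCE B (Python) =====
-- def c_aux(lista, i, j, r):
--     s = r
--     for k in range(len(lista) - j):
--         s += lista[i + k]
--         if s == lista[j + k]:
--             return True
--     return False
-- ===== Notes on version B (the rewrite author's own statement) =====
-- stated objective: simpler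
-- what changed: Replaces A's three-parameter recursion by a single for-loop over k in range(len(lista)-j) with a running sum; B performs the same element accesses in the same order, so it returns and raises exactly where A does.
-- outside the precondition, e.g. on c_aux([3, 3], 1, 0, 0): A returns True, B returns True
import Mathlib
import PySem

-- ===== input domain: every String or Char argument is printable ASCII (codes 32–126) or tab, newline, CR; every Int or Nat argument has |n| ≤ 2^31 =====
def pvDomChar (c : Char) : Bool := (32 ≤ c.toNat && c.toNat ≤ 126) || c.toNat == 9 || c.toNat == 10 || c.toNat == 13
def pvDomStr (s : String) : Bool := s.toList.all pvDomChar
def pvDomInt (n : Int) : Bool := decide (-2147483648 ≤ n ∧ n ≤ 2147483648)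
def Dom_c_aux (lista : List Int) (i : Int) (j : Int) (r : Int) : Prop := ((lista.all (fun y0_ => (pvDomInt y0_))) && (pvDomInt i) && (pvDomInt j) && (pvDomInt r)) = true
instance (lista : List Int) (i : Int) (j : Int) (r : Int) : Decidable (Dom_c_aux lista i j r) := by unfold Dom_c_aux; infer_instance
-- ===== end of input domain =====

-- B replaces A's three-parameter recursion by one for-loop over k in range(len(lista)-j)
-- with a running sum (objective: simpler); B performs the same accesses in the same order,
-- so it returns / raises exactly where A does, and the two PORTS agree on every input.

-- ===== PORT A =====
def c_aux (lista : List Int) (i : Int) (j : Int) (r : Int) : Bool :=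
  if (lista.length : Int) ≤ j then false
  else
    match PySem.List.pyGet? lista i, PySem.List.pyGet? lista j with
    | some xi, some xj =>
        if r + xi = xj then true
        else c_aux lista (i + 1) (j + 1) (r + xi)
    | _, _ => false          -- Python raises IndexError here; excluded by Pre_
termination_by ((lista.length : Int) - j).toNat
decreasing_by omega

-- ===== PORT B =====
-- the for-loop of Source B: recursion over the materialised range, running sum s
def bLoop (lista : List Int) (i : Int) (j : Int) : List Int → Int → Bool
  | [], _ => false
  | k :: ks, s =>
    match PySem.List.pyGet? lista (i + k) with
    | none => false          -- Python raises IndexError here; excluded by Pre_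
    | some xi =>
      match PySem.List.pyGet? lista (j + k) with
      | none => false        -- Python raises IndexError here; excluded by Pre_
      | some xj =>
          if s + xi = xj then true else bLoop lista i j ks (s + xi)

def c_aux_alt (lista : List Int) (i : Int) (j : Int) (r : Int) : Bool :=
  bLoop lista i j (PySem.List.pyRange 0 ((lista.length : Int) - j) 1) r

-- ===== PRECONDITION & SPEC =====
-- Pre_ exists ONLY to keep Python's IndexError out of the claim: with j in range but
-- i > j, or i or j below -len, some step accesses an out-of-range index and A raises
-- IndexError UNLESS a data-dependent match returns True first — so A's exact domain
-- there depends on the element values and has no closed form; we exclude that whole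
-- raise-prone region.  Nothing is hidden by this: B performs the identical accesses in
-- the identical order, so on every excluded input Python B returns the same True or
-- raises the same IndexError as A, and the Lean ports are proved equal UNCONDITIONALLY
-- (lemma c_aux_eq_alt_total below); Pre_ is not used to ease the proof.
def Pre_c_aux (lista : List Int) (i : Int) (j : Int) (r : Int) : Prop :=
  (lista.length : Int) ≤ j ∨ (-(lista.length : Int) ≤ i ∧ i ≤ j)
instance (lista : List Int) (i : Int) (j : Int) (r : Int) : Decidable (Pre_c_aux lista i j r) := by
  unfold Pre_c_aux; infer_instance
def pvWitness_c_aux : List Int × Int × Int × Int := ([1, 2, 3], 0, 1, 0)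

def Spec_c_aux (lista : List Int) (i : Int) (j : Int) (r : Int) (out : Bool) : Prop := out = c_aux_alt lista i j r
instance (lista : List Int) (i : Int) (j : Int) (r : Int) (out : Bool) : Decidable (Spec_c_aux lista i j r out) := by unfold Spec_c_aux; infer_instance

-- ===== CLAIM (what is proved, stated in full; the proofs are below) =====
def Claim_equal_c_aux : Prop := ∀ (lista : List Int) (i : Int) (j : Int) (r : Int), Dom_c_aux lista i j r → Pre_c_aux lista i j r → Spec_c_aux lista i j r (c_aux lista i j r)

-- ===== LEMMAS AND PROOFS =====

-- shifting both offsets by 1 = shifting every loop index by 1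
lemma bLoop_shift (lista : List Int) (i j : Int) :
    ∀ (ks : List Int) (s : Int),
      bLoop lista (i + 1) (j + 1) ks s = bLoop lista i j (ks.map (· + 1)) s := by
  intro ks
  induction ks with
  | nil => intro s; simp [bLoop]
  | cons k ks ih =>
      intro s
      have hi : i + 1 + k = i + (k + 1) := by ring
      have hj : j + 1 + k = j + (k + 1) := by ring
      simp only [bLoop, List.map_cons, hi, hj]
      cases PySem.List.pyGet? lista (i + (k + 1)) with
      | none => rfl
      | some xi =>
          cases PySem.List.pyGet? lista (j + (k + 1)) with
          | none => rfl
          | some xj =>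
              by_cases h : s + xi = xj
              · simp [h]
              · simp [h, ih]

lemma pyRange_one_shift (b : Int) :
    PySem.List.pyRange 1 b 1 = (PySem.List.pyRange 0 (b - 1) 1).map (· + 1) := by
  rw [PySem.List.pyRange_one, PySem.List.pyRange_one, List.map_map]
  have hn : (b - 1 - 0).toNat = (b - 1).toNat := by omega
  rw [hn]
  apply List.map_congr_left
  intro k _
  simp; omega

-- the ports agree on EVERY input (Pre_ only marks where the PYTHONS return rather than raise)
lemma c_aux_eq_alt_total (lista : List Int) :
    ∀ (m : Nat) (i j r : Int), ((lista.length : Int) - j).toNat = m →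
      c_aux lista i j r = bLoop lista i j (PySem.List.pyRange 0 ((lista.length : Int) - j) 1) r := by
  intro m
  induction m with
  | zero =>
      intro i j r hm
      rw [c_aux, if_pos (by omega), PySem.List.pyRange_one_eq_nil (by omega)]
      rfl
  | succ m ih =>
      intro i j r hm
      have hjn : j < (lista.length : Int) := by omega
      rw [PySem.List.pyRange_one_cons (by omega)]
      rw [c_aux, if_neg (by omega)]
      simp only [bLoop, add_zero]
      cases hxi : PySem.List.pyGet? lista i with
      | none => rfl
      | some xi =>
        cases hxj : PySem.List.pyGet? lista j with
        | none => rfl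
        | some xj =>
          by_cases hb : r + xi = xj
          · simp [hb]
          · simp only [if_neg hb]
            rw [ih (i + 1) (j + 1) (r + xi) (by omega)]
            rw [bLoop_shift]
            congr 1
            rw [show (0 : Int) + 1 = 1 from by norm_num,
                pyRange_one_shift ((lista.length : Int) - j)]
            congr 2
            omega

-- ===== VERDICT (by name: the statement is the Claim_ definition above) =====
theorem c_aux_spec : Claim_equal_c_aux := by
  intro lista i j r _ _
  unfold Spec_c_aux c_aux_alt
  exact c_aux_eq_alt_total lista ((lista.length : Int) - j).toNat i j r rfl
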